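-- pv_equiv track=rewrite | github.com/arin17bishwa/myCP_sols | CF/1342C.py | func
-- ===== SOURCE A (Python) =====
-- def func(s):
--     s = ''.join((s, 'R'))
--     l = []
--     n = len(s)
--     for i in range(n):
--         if s[i] == 'R':
--             l.append(i + 1)
--     m = -1
--     k = len(l)
--     if k == 0:
--         return n + 1
--     prev = 0
--     for i in range(k):
--         m = max(m, l[i] - prev)
--         prev = l[i]
--     return m
-- ===== SOURCE B (Python) =====
-- def func(s):
--     best = 0
--     cur = 0
--     for ch in s:
--         if ch == 'R':
--             cur = 0
--         else:
--             cur += 1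
--             if cur > best:
--                 best = cur
--     return best + 1
-- ===== Notes on version B (the rewrite author's own statement) =====
-- stated objective: simpler
-- what changed: B replaces A's two-pass scheme (build the list of 'R' positions in s+'R', then difference consecutive positions) with a single pass that tracks the current and maximal run of non-'R' characters and returns max run + 1; no position list, no sentinel append, no second loop.
import Mathlib
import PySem

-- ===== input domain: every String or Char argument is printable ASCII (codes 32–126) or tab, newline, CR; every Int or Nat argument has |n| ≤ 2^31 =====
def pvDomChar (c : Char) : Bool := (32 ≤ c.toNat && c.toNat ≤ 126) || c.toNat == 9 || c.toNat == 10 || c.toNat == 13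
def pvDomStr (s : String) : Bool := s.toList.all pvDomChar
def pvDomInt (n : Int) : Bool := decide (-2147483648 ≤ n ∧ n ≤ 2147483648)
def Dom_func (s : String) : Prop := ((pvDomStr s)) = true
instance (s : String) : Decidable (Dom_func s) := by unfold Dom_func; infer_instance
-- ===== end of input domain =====

-- B replaces A's position-list-plus-differencing with a one-pass longest-run-of-non-'R' scan (same O(n) cost, simpler).


-- ===== PORT A =====
def func (s : String) : Int :=
  let s' := PySem.Str.join "" [s, "R"]          -- s = ''.join((s, 'R'))
  let n : Int := PySem.Str.len s'
  -- for i in range(n): if s[i] == 'R': l.append(i + 1)   (i is in range, so pyGetD is exact for s[i] here)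
  let l : List Int := (PySem.List.pyRange 0 n 1).foldl
    (fun l i => if PySem.List.pyGetD s'.toList i ' ' = 'R' then l ++ [i + 1] else l) []
  let m : Int := -1
  let k : Int := (l.length : Int)
  if k = 0 then n + 1
  else
    -- for i in range(k): m = max(m, l[i] - prev); prev = l[i]   (i is in range, so pyGetD is exact for l[i] here)
    let mp := (PySem.List.pyRange 0 k 1).foldl
      (fun (mp : Int × Int) i =>
        (max mp.1 (PySem.List.pyGetD l i 0 - mp.2), PySem.List.pyGetD l i 0)) (m, 0)
    mp.1

-- ===== PORT B =====
def func_alt (s : String) : Int :=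
  let bc := s.toList.foldl
    (fun (bc : Int × Int) ch =>
      if ch = 'R' then (bc.1, 0)
      else (if bc.2 + 1 > bc.1 then bc.2 + 1 else bc.1, bc.2 + 1)) (0, 0)
  bc.1 + 1

-- ===== PRECONDITION & SPEC =====
def Spec_func (s : String) (out : Int) : Prop := out = func_alt s
instance (s : String) (out : Int) : Decidable (Spec_func s out) := by unfold Spec_func; infer_instance

-- ===== CLAIM (what is proved, stated in full; the proofs are below) =====
def Claim_equal_func : Prop := ∀ (s : String), Dom_func s → Spec_func s (func s)

-- ===== LEMMAS AND PROOFS =====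

-- A's second loop body and B's loop body, named for the proofs
def step2 (mp : Int × Int) (x : Int) : Int × Int := (max mp.1 (x - mp.2), x)

def stepB (bc : Int × Int) (ch : Char) : Int × Int :=
  if ch = 'R' then (bc.1, 0)
  else (if bc.2 + 1 > bc.1 then bc.2 + 1 else bc.1, bc.2 + 1)

-- 1-based positions (offset k) of 'R' in a character list: what A's first loop collects
def posR : List Char → Int → List Int
  | [], _ => []
  | c :: t, k => (if c = 'R' then [k + 1] else []) ++ posR t (k + 1)

lemma posR_append (u v : List Char) (k : Int) :
    posR (u ++ v) k = posR u k ++ posR v (k + u.length) := by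
  induction u generalizing k with
  | nil => simp [posR]
  | cons c u ih =>
      have h : k + 1 + (u.length : Int) = k + ((u.length : Int) + 1) := by ring
      simp [posR, ih, h, List.append_assoc]

lemma posR_concat_ne (t : List Char) (p : Int) : posR (t ++ ['R']) p ≠ [] := by
  induction t generalizing p with
  | nil => simp [posR]
  | cons c t ih => simp [posR]; intro _; exact ih (p + 1)

lemma build (cs : List Char) :
    (List.range cs.length).foldl
      (fun l i => if cs.getD i ' ' = 'R' then l ++ [(i : Int) + 1] else l) [] = posR cs 0 := by
  induction cs using List.reverseRecOn with
  | nil => simp [posR]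
  | append_singleton w c ih =>
      rw [List.length_append, List.length_singleton, List.range_succ, List.foldl_append]
      have hcongr : (List.range w.length).foldl
          (fun l i => if (w ++ [c]).getD i ' ' = 'R' then l ++ [(i : Int) + 1] else l) ([] : List Int)
          = (List.range w.length).foldl
          (fun l i => if w.getD i ' ' = 'R' then l ++ [(i : Int) + 1] else l) [] := by
        apply PySem.List.foldl_congr_mem
        intro acc i hi
        rw [List.mem_range] at hi
        simp [List.getD, List.getElem?_append_left hi]
      have hlast : (w ++ [c]).getD w.length ' ' = c := by
        simp [List.getD]
      rw [hcongr, ih]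
      simp only [List.foldl_cons, List.foldl_nil, hlast]
      rw [posR_append]
      simp only [posR, List.append_nil]
      split <;> simp

lemma le_stepB_fst (t : List Char) (b c : Int) : b ≤ (t.foldl stepB (b, c)).1 := by
  induction t generalizing b c with
  | nil => simp
  | cons ch t ih =>
      simp only [List.foldl_cons, stepB]
      split_ifs with h1 h2
      · exact ih b 0
      · exact le_trans (by omega) (ih (c + 1) (c + 1))
      · exact ih b (c + 1)

lemma main_lemma (t : List Char) (p m b c : Int) (hc : 0 ≤ c) (hcb : c ≤ b)
    (hbm : b ≤ max (m - 1) c) :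
    ((posR (t ++ ['R']) p).foldl step2 (m, p - c)).1 = max m ((t.foldl stepB (b, c)).1 + 1) := by
  induction t generalizing p m b c with
  | nil =>
      simp [posR, step2]
      omega
  | cons c0 t ih =>
      by_cases h : c0 = 'R'
      · subst h
        simp only [List.cons_append, posR, if_true, List.foldl_cons, stepB]
        have hstep : step2 (m, p - c) (p + 1) = (max m (c + 1), (p + 1) - 0) := by
          simp [step2]; omega
        rw [hstep, List.nil_append, ih (p + 1) (max m (c + 1)) b 0 le_rfl (by omega) (by omega)]
        have hX := le_stepB_fst t b 0
        omega
      · simp only [List.cons_append, posR, if_neg h, List.nil_append, List.foldl_cons, stepB,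
          if_neg h]
        have hprev : p - c = (p + 1) - (c + 1) := by ring
        rw [hprev, ih (p + 1) m (if c + 1 > b then c + 1 else b) (c + 1) (by omega) (by omega)
          (by omega)]

lemma alt_eq (s : String) : func_alt s = (s.toList.foldl stepB (0, 0)).1 + 1 := rfl

lemma func_eq (s : String) :
    func s = ((posR (s.toList ++ ['R']) 0).foldl step2 (-1, 0)).1 := by
  have hS : (PySem.Str.join "" [s, "R"]).toList = s.toList ++ ['R'] := by
    rw [PySem.Str.toList_join]
    simp [PySem.Chars.join_cons_cons, PySem.Chars.join_singleton]
  have hn : PySem.Str.len (PySem.Str.join "" [s, "R"]) = ((s.toList ++ ['R']).length : Int) := by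
    rw [PySem.Str.len_eq, hS]
  simp only [func, hS, hn]
  rw [PySem.List.pyRange_zero_natCast, List.foldl_map]
  simp only [PySem.List.pyGetD_natCast]
  rw [build (s.toList ++ ['R'])]
  rw [if_neg (by simpa using posR_concat_ne s.toList 0)]
  rw [PySem.List.foldl_pyRange_zero_pyGetD' (posR (s.toList ++ ['R']) 0) 0
    (fun mp x => (max mp.1 (x - mp.2), x)) ((-1 : Int), (0 : Int))]
  rfl

-- ===== VERDICT (by name: the statement is the Claim_ definition above) =====
theorem func_spec : Claim_equal_func := by
  intro s _
  unfold Spec_func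
  rw [func_eq, alt_eq]
  have h := main_lemma s.toList 0 (-1) 0 0 le_rfl le_rfl (by norm_num)
  norm_num at h
  rw [h]
  have hX := le_stepB_fst s.toList 0 0
  omega
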